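-- pv_equiv track=rewrite | github.com/jk-jung/problem-solving | codewars/6kyu/6_Simple Barcode Scanner.py | barcode_scanner
-- ===== SOURCE A (Python) =====
-- def barcode_scanner(s):
--     p = {
--         '0': '1110010',
--         '1': '1100110',
--         '2': '1101100',
--         '3': '1000010',
--         '4': '1011100',
--         '5': '1001110',
--         '6': '0101111',
--         '7': '0111011',
--         '8': '0110111',
--         '9': '0001011',
--     }
--     a = s[3:45] + s[50:92]
--     r = ''
--     for i in range(0, len(a), 7):
--         def f(x, y):
--             return x == y or all(c != d for c, d in zip(x, y))
--         r += [k for k, v in p.items() if f(v, a[i:i + 7])][0]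
--     return r
-- ===== SOURCE B (Python) =====
-- def barcode_scanner(s):
--     pats = ['1110010', '1100110', '1101100', '1000010', '1011100',
--             '1001110', '0101111', '0111011', '0110111', '0001011']
--     # elim[j][b]: digits whose pattern has bit b at position j (precomputed position index)
--     elim = [[[k for k in range(10) if pats[k][j] == b] for b in '01'] for j in range(7)]
--     a = s[3:45] + s[50:92]
--     r = ''
--     for i in range(0, len(a), 7):
--         c = a[i:i + 7]
--         # positional elimination: a digit survives iff its pattern differs from c everywhere
--         cands = set(range(10))
--         for j, ch in enumerate(c):
--             if ch == '0':
--                 cands -= set(elim[j][0])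
--             elif ch == '1':
--                 cands -= set(elim[j][1])
--         if c in pats:
--             cands.add(pats.index(c))
--         r += str(min(cands))
--     return r
-- ===== Notes on version B (the rewrite author's own statement) =====
-- stated objective: alternative
-- what changed: Per 7-char chunk, A scans all ten digit patterns testing equality-or-positionwise-complement; B instead precomputes a position->digits index and decodes each chunk by positional candidate elimination (set intersection semantics) plus an exact-match lookup, taking min of the surviving candidates.
import Mathlib
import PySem

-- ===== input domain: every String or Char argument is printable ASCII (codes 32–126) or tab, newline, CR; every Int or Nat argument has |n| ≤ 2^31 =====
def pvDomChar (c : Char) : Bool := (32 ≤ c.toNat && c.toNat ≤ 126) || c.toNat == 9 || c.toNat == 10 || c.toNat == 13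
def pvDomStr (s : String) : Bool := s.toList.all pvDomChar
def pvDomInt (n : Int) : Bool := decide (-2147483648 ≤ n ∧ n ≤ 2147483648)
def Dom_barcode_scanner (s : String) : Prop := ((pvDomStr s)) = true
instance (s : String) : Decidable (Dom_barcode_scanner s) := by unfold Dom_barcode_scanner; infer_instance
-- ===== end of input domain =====

-- B replaces A's per-chunk scan of all ten digit patterns by positional elimination over a
-- precomputed position→digit index (objective: alternative algorithm; A raises IndexError and B
-- ValueError on chunks matching no pattern — those inputs are outside Pre_).

-- ===== PORT A =====
-- the dict p, as its items (key, value) with values as char lists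
def pvItemsA : List (String × List Char) :=
  [("0", "1110010".toList), ("1", "1100110".toList), ("2", "1101100".toList),
   ("3", "1000010".toList), ("4", "1011100".toList), ("5", "1001110".toList),
   ("6", "0101111".toList), ("7", "0111011".toList), ("8", "0110111".toList),
   ("9", "0001011".toList)]

-- inner 'def f(x, y)'
def pvFA (x y : List Char) : Bool := x == y || (x.zip y).all (fun cd => cd.1 != cd.2)

def barcode_scanner (s : String) : String :=
  let a : List Char := PySem.List.slice s.toList (some 3) (some 45) ++
                       PySem.List.slice s.toList (some 50) (some 92)
  (PySem.List.pyRange 0 (a.length : Int) 7).foldl (fun r i =>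
    r ++ ((((pvItemsA.filter (fun kv : String × List Char => pvFA kv.2 (PySem.List.slice a (some i) (some (i + 7))))).map
        (fun kv : String × List Char => kv.1)) |> (PySem.List.pyGet? · 0)).getD "")) ""

-- ===== PORT B =====
-- pats
def pvPatsB : List (List Char) :=
  ["1110010".toList, "1100110".toList, "1101100".toList, "1000010".toList, "1011100".toList,
   "1001110".toList, "0101111".toList, "0111011".toList, "0110111".toList, "0001011".toList]

-- elim = [[[k for k in range(10) if pats[k][j] == b] for b in '01'] for j in range(7)]
def pvElimB : List (List (List Int)) :=
  (PySem.List.pyRange 0 7 1).map (fun j =>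
    ("01".toList).map (fun b =>
      (PySem.List.pyRange 0 10 1).filter (fun k =>
        PySem.List.pyGetD (PySem.List.pyGetD pvPatsB k []) j ' ' == b)))

-- loop body 'for j, ch in enumerate(c): …'
def pvStepB (cands : PySem.Set Int) (jch : Int × Char) : PySem.Set Int :=
  if jch.2 = '0' then
    PySem.Set.diff cands (PySem.Set.ofList (PySem.List.pyGetD (PySem.List.pyGetD pvElimB jch.1 []) 0 []))
  else if jch.2 = '1' then
    PySem.Set.diff cands (PySem.Set.ofList (PySem.List.pyGetD (PySem.List.pyGetD pvElimB jch.1 []) 1 []))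
  else cands

-- per-chunk work: elimination, exact-match add, str(min(cands))
def pvChunkB (c : List Char) : String :=
  let cands : PySem.Set Int :=
    (PySem.List.enumerate c 0).foldl pvStepB (PySem.Set.ofList (PySem.List.pyRange 0 10 1))
  let cands : PySem.Set Int :=
    if c ∈ pvPatsB then PySem.Set.add cands (((PySem.List.index? pvPatsB c).getD 0 : Nat) : Int)
    else cands
  PySem.Int.toStr ((PySem.List.min? cands (fun x => x)).getD 0)

def barcode_scanner_alt (s : String) : String :=
  let a : List Char := PySem.List.slice s.toList (some 3) (some 45) ++
                       PySem.List.slice s.toList (some 50) (some 92)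
  (PySem.List.pyRange 0 (a.length : Int) 7).foldl (fun r i =>
    r ++ pvChunkB (PySem.List.slice a (some i) (some (i + 7)))) ""

-- ===== PRECONDITION & SPEC =====
-- Pre_ = exactly the inputs where A returns: every 7-char block of the scanned area equals some
-- digit pattern or differs from it at every position (otherwise A raises IndexError).
def Pre_barcode_scanner (s : String) : Prop :=
  let a : List Char := PySem.List.slice s.toList (some 3) (some 45) ++
                       PySem.List.slice s.toList (some 50) (some 92)
  ∀ i ∈ PySem.List.pyRange 0 (a.length : Int) 7,
    ∃ v ∈ pvPatsB,
      (v == PySem.List.slice a (some i) (some (i + 7)) ||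
       (v.zip (PySem.List.slice a (some i) (some (i + 7)))).all (fun cd => cd.1 != cd.2)) = true
instance (s : String) : Decidable (Pre_barcode_scanner s) := by unfold Pre_barcode_scanner; infer_instance

def pvWitness_barcode_scanner : String := ""

def Spec_barcode_scanner (s : String) (out : String) : Prop := out = barcode_scanner_alt s
instance (s : String) (out : String) : Decidable (Spec_barcode_scanner s out) := by unfold Spec_barcode_scanner; infer_instance

-- ===== CLAIM (what is proved, stated in full; the proofs are below) =====
def Claim_equal_barcode_scanner : Prop := ∀ (s : String), Dom_barcode_scanner s → Pre_barcode_scanner s → Spec_barcode_scanner s (barcode_scanner s)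

-- ===== LEMMAS AND PROOFS =====


-- proof-side helpers and lemmas

-- B's final candidate set for one chunk (pvChunkB c = toStr(min(pvCandsFinal c)))
def pvCandsFinal (c : List Char) : PySem.Set Int :=
  let cands : PySem.Set Int :=
    (PySem.List.enumerate c 0).foldl pvStepB (PySem.Set.ofList (PySem.List.pyRange 0 10 1))
  if c ∈ pvPatsB then PySem.Set.add cands (((PySem.List.index? pvPatsB c).getD 0 : Nat) : Int)
  else cands

theorem chunkB_eq (c : List Char) :
    pvChunkB c = PySem.Int.toStr ((PySem.List.min? (pvCandsFinal c) (fun x => x)).getD 0) := rfl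

-- table facts, checked by computation
theorem pvFacts : ∀ j ∈ List.range 7, ∀ k ∈ List.range 10,
    ((pvPatsB.getD k []).getD j ' ' = '0' ∨ (pvPatsB.getD k []).getD j ' ' = '1')
    ∧ (((k : Int) ∈ PySem.List.pyGetD (PySem.List.pyGetD pvElimB (j : Int) []) 0 []) ↔
        (pvPatsB.getD k []).getD j ' ' = '0')
    ∧ (((k : Int) ∈ PySem.List.pyGetD (PySem.List.pyGetD pvElimB (j : Int) []) 1 []) ↔
        (pvPatsB.getD k []).getD j ' ' = '1') := by decide

theorem pats_len : pvPatsB.length = 10 := by decide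
theorem pats_nodup : pvPatsB.Nodup := by decide
theorem pats_each_len : ∀ k ∈ List.range 10, (pvPatsB.getD k []).length = 7 := by decide

theorem mem_foldl_step (l : List (Int × Char)) (cands : PySem.Set Int) (k : Int) :
    k ∈ l.foldl pvStepB cands ↔ k ∈ cands ∧ ∀ p ∈ l,
      ¬(p.2 = '0' ∧ k ∈ PySem.List.pyGetD (PySem.List.pyGetD pvElimB p.1 []) 0 []) ∧
      ¬(p.2 = '1' ∧ k ∈ PySem.List.pyGetD (PySem.List.pyGetD pvElimB p.1 []) 1 []) := by
  induction l generalizing cands with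
  | nil => simp
  | cons p l ih =>
    simp only [List.foldl_cons, ih, List.mem_cons]
    have hstep : k ∈ pvStepB cands p ↔ k ∈ cands ∧
        ¬(p.2 = '0' ∧ k ∈ PySem.List.pyGetD (PySem.List.pyGetD pvElimB p.1 []) 0 []) ∧
        ¬(p.2 = '1' ∧ k ∈ PySem.List.pyGetD (PySem.List.pyGetD pvElimB p.1 []) 1 []) := by
      unfold pvStepB
      split_ifs with h0 h1
      · rw [PySem.Set.mem_diff, PySem.Set.mem_ofList]
        constructor
        · rintro ⟨hm, hn⟩
          exact ⟨hm, fun hx => hn hx.2, fun hx => by rw [h0] at hx; exact absurd hx.1 (by decide)⟩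
        · rintro ⟨hm, hn, -⟩
          exact ⟨hm, fun hx => hn ⟨h0, hx⟩⟩
      · rw [PySem.Set.mem_diff, PySem.Set.mem_ofList]
        constructor
        · rintro ⟨hm, hn⟩
          exact ⟨hm, fun hx => absurd (hx.1.symm.trans h1) (by simp), fun hx => hn hx.2⟩
        · rintro ⟨hm, -, hn⟩
          exact ⟨hm, fun hx => hn ⟨h1, hx⟩⟩
      · constructor
        · intro hm
          exact ⟨hm, fun hx => h0 hx.1, fun hx => h1 hx.1⟩
        · exact fun hx => hx.1
    rw [hstep]
    constructor
    · rintro ⟨⟨hm, hp⟩, hall⟩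
      exact ⟨hm, fun q hq => by rcases hq with rfl | hq
                                · exact hp
                                · exact hall q hq⟩
    · rintro ⟨hm, hall⟩
      exact ⟨⟨hm, hall p (Or.inl rfl)⟩, fun q hq => hall q (Or.inr hq)⟩

theorem mem_cands (c : List Char) (hc : c.length ≤ 7) (k : Int) :
    k ∈ (PySem.List.enumerate c 0).foldl pvStepB (PySem.Set.ofList (PySem.List.pyRange 0 10 1)) ↔
    0 ≤ k ∧ k < 10 ∧ ∀ jn : Nat, jn < c.length →
      c.getD jn ' ' ≠ (pvPatsB.getD k.toNat []).getD jn ' ' := by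
  rw [mem_foldl_step]
  have hr : (k ∈ PySem.Set.ofList (PySem.List.pyRange 0 10 1)) ↔ 0 ≤ k ∧ k < 10 := by
    rw [PySem.Set.mem_ofList, PySem.List.mem_pyRange_one]
  constructor
  · rintro ⟨hk0, hall⟩
    obtain ⟨hk1, hk2⟩ := hr.1 hk0
    refine ⟨hk1, hk2, fun jn hj => ?_⟩
    have hp := hall ((0 : Int) + jn, GetElem.getElem c jn hj)
      ((PySem.List.mem_enumerate_iff c 0 _).2 ⟨jn, hj, rfl⟩)
    simp only [zero_add] at hp
    have hf := pvFacts jn (by simp; omega) k.toNat (by simp; omega)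
    rw [Int.toNat_of_nonneg hk1] at hf
    rw [List.getD_eq_getElem c ' ' hj]
    rcases hf.1 with hb | hb <;> rw [hb]
    · intro he; exact hp.1 ⟨he, hf.2.1.2 hb⟩
    · intro he; exact hp.2 ⟨he, hf.2.2.2 hb⟩
  · rintro ⟨hk1, hk2, hne⟩
    refine ⟨hr.2 ⟨hk1, hk2⟩, fun p hp => ?_⟩
    obtain ⟨jn, hj, rfl⟩ := (PySem.List.mem_enumerate_iff c 0 p).1 hp
    simp only [zero_add]
    have hf := pvFacts jn (by simp; omega) k.toNat (by simp; omega)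
    rw [Int.toNat_of_nonneg hk1] at hf
    have hne' := hne jn hj
    rw [List.getD_eq_getElem c ' ' hj] at hne'
    constructor
    · rintro ⟨he, hmem⟩
      exact hne' (by rw [he, hf.2.1.1 hmem])
    · rintro ⟨he, hmem⟩
      exact hne' (by rw [he, hf.2.2.1 hmem])

theorem zipall_iff (v c : List Char) (hv : v.length = 7) (hc : c.length ≤ 7) :
    ((v.zip c).all (fun cd => cd.1 != cd.2) = true) ↔
    ∀ jn : Nat, jn < c.length → c.getD jn ' ' ≠ v.getD jn ' ' := by
  rw [List.all_eq_true]
  have hzl : (v.zip c).length = c.length := by rw [List.length_zip, hv]; omega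
  constructor
  · intro h jn hj
    have hz : jn < (v.zip c).length := by omega
    have hx := h (v.zip c)[jn] (List.getElem_mem hz)
    rw [List.getElem_zip] at hx
    simp only [bne_iff_ne, ne_eq] at hx
    rw [List.getD_eq_getElem v ' ' (by omega), List.getD_eq_getElem c ' ' hj]
    exact fun he => hx (by rw [he])
  · intro h x hx
    obtain ⟨jn, hz, rfl⟩ := List.mem_iff_getElem.1 hx
    rw [List.getElem_zip]
    simp only [bne_iff_ne, ne_eq]
    intro he
    have hj : jn < c.length := by omega
    have := h jn hj
    rw [List.getD_eq_getElem v ' ' (by omega), List.getD_eq_getElem c ' ' hj] at this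
    exact this (by rw [he])

theorem mem_final (c : List Char) (hc : c.length ≤ 7) (k : Int) :
    k ∈ pvCandsFinal c ↔ 0 ≤ k ∧ k < 10 ∧ pvFA (pvPatsB.getD k.toNat []) c = true := by
  have hQ : ∀ kn : Nat, kn < 10 →
      (pvFA (pvPatsB.getD kn []) c = true ↔
        (pvPatsB.getD kn [] = c ∨ ∀ jn : Nat, jn < c.length →
          c.getD jn ' ' ≠ (pvPatsB.getD kn []).getD jn ' ')) := by
    intro kn hkn
    simp only [pvFA, Bool.or_eq_true, beq_iff_eq]
    rw [zipall_iff _ c (pats_each_len kn (by simp [hkn])) hc]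
  unfold pvCandsFinal
  by_cases hmem : c ∈ pvPatsB
  · rw [if_pos hmem]
    obtain ⟨t0, ht0⟩ := Option.isSome_iff_exists.1
      ((PySem.List.index?_isSome_iff pvPatsB c).2 hmem)
    obtain ⟨hk10', hpt, -⟩ := PySem.List.getElem_of_index?_eq_some ht0
    have hk10 : t0 < 10 := by rw [pats_len] at hk10'; omega
    rw [ht0]
    simp only [Option.getD_some]
    rw [PySem.Set.mem_add, mem_cands c hc]
    constructor
    · rintro (⟨hk1, hk2, hne⟩ | rfl)
      · exact ⟨hk1, hk2, (hQ k.toNat (by omega)).2 (Or.inr hne)⟩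
      · refine ⟨by positivity, by exact_mod_cast hk10, ?_⟩
        rw [Int.toNat_natCast]
        exact (hQ t0 hk10).2 (Or.inl ((List.getD_eq_getElem _ _ hk10').trans hpt))
    · rintro ⟨hk1, hk2, hfa⟩
      rcases (hQ k.toNat (by omega)).1 hfa with he | hne
      · right
        have hkn : k.toNat < pvPatsB.length := by rw [pats_len]; omega
        have heq : pvPatsB[k.toNat] = pvPatsB[t0] := by
          rw [← List.getD_eq_getElem _ [] hkn, he, ← hpt]
          rfl
        have := (pats_nodup.getElem_inj_iff).1 heq
        omega
      · exact Or.inl ⟨hk1, hk2, hne⟩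
  · rw [if_neg hmem, mem_cands c hc]
    constructor
    · rintro ⟨hk1, hk2, hne⟩
      exact ⟨hk1, hk2, (hQ k.toNat (by omega)).2 (Or.inr hne)⟩
    · rintro ⟨hk1, hk2, hfa⟩
      refine ⟨hk1, hk2, ?_⟩
      rcases (hQ k.toNat (by omega)).1 hfa with he | hne
      · exfalso
        have hkn : k.toNat < pvPatsB.length := by rw [pats_len]; omega
        have hmem' : pvPatsB.getD k.toNat [] ∈ pvPatsB := by
          rw [List.getD_eq_getElem _ _ hkn]
          exact List.getElem_mem hkn
        rw [he] at hmem'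
        exact hmem hmem'
      · exact hne

theorem B_branch (c : List Char) (hc : c.length ≤ 7) (t : Nat) (ht : t < 10)
    (htrue : pvFA (pvPatsB.getD t []) c = true)
    (hfalse : ∀ j, j < t → pvFA (pvPatsB.getD j []) c = false) :
    pvChunkB c = PySem.Int.toStr (t : Int) := by
  rw [chunkB_eq]
  have htm : (t : Int) ∈ pvCandsFinal c := by
    rw [mem_final c hc]
    exact ⟨by positivity, by exact_mod_cast ht, by rwa [Int.toNat_natCast]⟩
  obtain ⟨m, hmeq⟩ : ∃ m, PySem.List.min? (pvCandsFinal c) (fun x => x) = some m := by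
    cases hmin : PySem.List.min? (pvCandsFinal c) (fun x => x) with
    | none =>
      rw [PySem.List.min?_eq_none_iff] at hmin
      rw [hmin] at htm
      exact absurd htm List.not_mem_nil
    | some m => exact ⟨m, rfl⟩
  rw [hmeq, Option.getD_some]
  have hmm := (mem_final c hc m).1 (PySem.List.min?_mem hmeq)
  have hle : m ≤ (t : Int) := PySem.List.min?_isMin hmeq _ htm
  obtain ⟨hm0, hm10, hQm⟩ := hmm
  have hmt : m = (t : Int) := by
    by_contra hne
    have h1 : m.toNat < t := by omega
    rw [hfalse m.toNat h1] at hQm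
    exact Bool.false_ne_true hQm
  rw [hmt]

theorem A_branch (c : List Char) (t : Nat) (ht : t < 10)
    (htrue : pvFA (pvPatsB.getD t []) c = true)
    (hfalse : ∀ j, j < t → pvFA (pvPatsB.getD j []) c = false) :
    (PySem.List.pyGet? ((pvItemsA.filter
        (fun kv : String × List Char => pvFA kv.2 c)).map
        (fun kv : String × List Char => kv.1)) 0).getD "" = PySem.Int.toStr (t : Int) := by
  interval_cases t
  ·
    have ht' : pvFA ['1', '1', '1', '0', '0', '1', '0'] c = true := htrue
    simp [pvItemsA, List.filter_cons, ht']
    decide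
  ·
    have h0 : pvFA ['1', '1', '1', '0', '0', '1', '0'] c = false := hfalse 0 (by omega)
    have ht' : pvFA ['1', '1', '0', '0', '1', '1', '0'] c = true := htrue
    simp [pvItemsA, List.filter_cons, h0, ht']
    decide
  ·
    have h0 : pvFA ['1', '1', '1', '0', '0', '1', '0'] c = false := hfalse 0 (by omega)
    have h1 : pvFA ['1', '1', '0', '0', '1', '1', '0'] c = false := hfalse 1 (by omega)
    have ht' : pvFA ['1', '1', '0', '1', '1', '0', '0'] c = true := htrue
    simp [pvItemsA, List.filter_cons, h0, h1, ht']
    decide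
  ·
    have h0 : pvFA ['1', '1', '1', '0', '0', '1', '0'] c = false := hfalse 0 (by omega)
    have h1 : pvFA ['1', '1', '0', '0', '1', '1', '0'] c = false := hfalse 1 (by omega)
    have h2 : pvFA ['1', '1', '0', '1', '1', '0', '0'] c = false := hfalse 2 (by omega)
    have ht' : pvFA ['1', '0', '0', '0', '0', '1', '0'] c = true := htrue
    simp [pvItemsA, List.filter_cons, h0, h1, h2, ht']
    decide
  ·
    have h0 : pvFA ['1', '1', '1', '0', '0', '1', '0'] c = false := hfalse 0 (by omega)
    have h1 : pvFA ['1', '1', '0', '0', '1', '1', '0'] c = false := hfalse 1 (by omega)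
    have h2 : pvFA ['1', '1', '0', '1', '1', '0', '0'] c = false := hfalse 2 (by omega)
    have h3 : pvFA ['1', '0', '0', '0', '0', '1', '0'] c = false := hfalse 3 (by omega)
    have ht' : pvFA ['1', '0', '1', '1', '1', '0', '0'] c = true := htrue
    simp [pvItemsA, List.filter_cons, h0, h1, h2, h3, ht']
    decide
  ·
    have h0 : pvFA ['1', '1', '1', '0', '0', '1', '0'] c = false := hfalse 0 (by omega)
    have h1 : pvFA ['1', '1', '0', '0', '1', '1', '0'] c = false := hfalse 1 (by omega)
    have h2 : pvFA ['1', '1', '0', '1', '1', '0', '0'] c = false := hfalse 2 (by omega)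
    have h3 : pvFA ['1', '0', '0', '0', '0', '1', '0'] c = false := hfalse 3 (by omega)
    have h4 : pvFA ['1', '0', '1', '1', '1', '0', '0'] c = false := hfalse 4 (by omega)
    have ht' : pvFA ['1', '0', '0', '1', '1', '1', '0'] c = true := htrue
    simp [pvItemsA, List.filter_cons, h0, h1, h2, h3, h4, ht']
    decide
  ·
    have h0 : pvFA ['1', '1', '1', '0', '0', '1', '0'] c = false := hfalse 0 (by omega)
    have h1 : pvFA ['1', '1', '0', '0', '1', '1', '0'] c = false := hfalse 1 (by omega)
    have h2 : pvFA ['1', '1', '0', '1', '1', '0', '0'] c = false := hfalse 2 (by omega)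
    have h3 : pvFA ['1', '0', '0', '0', '0', '1', '0'] c = false := hfalse 3 (by omega)
    have h4 : pvFA ['1', '0', '1', '1', '1', '0', '0'] c = false := hfalse 4 (by omega)
    have h5 : pvFA ['1', '0', '0', '1', '1', '1', '0'] c = false := hfalse 5 (by omega)
    have ht' : pvFA ['0', '1', '0', '1', '1', '1', '1'] c = true := htrue
    simp [pvItemsA, List.filter_cons, h0, h1, h2, h3, h4, h5, ht']
    decide
  ·
    have h0 : pvFA ['1', '1', '1', '0', '0', '1', '0'] c = false := hfalse 0 (by omega)
    have h1 : pvFA ['1', '1', '0', '0', '1', '1', '0'] c = false := hfalse 1 (by omega)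
    have h2 : pvFA ['1', '1', '0', '1', '1', '0', '0'] c = false := hfalse 2 (by omega)
    have h3 : pvFA ['1', '0', '0', '0', '0', '1', '0'] c = false := hfalse 3 (by omega)
    have h4 : pvFA ['1', '0', '1', '1', '1', '0', '0'] c = false := hfalse 4 (by omega)
    have h5 : pvFA ['1', '0', '0', '1', '1', '1', '0'] c = false := hfalse 5 (by omega)
    have h6 : pvFA ['0', '1', '0', '1', '1', '1', '1'] c = false := hfalse 6 (by omega)
    have ht' : pvFA ['0', '1', '1', '1', '0', '1', '1'] c = true := htrue
    simp [pvItemsA, List.filter_cons, h0, h1, h2, h3, h4, h5, h6, ht']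
    decide
  ·
    have h0 : pvFA ['1', '1', '1', '0', '0', '1', '0'] c = false := hfalse 0 (by omega)
    have h1 : pvFA ['1', '1', '0', '0', '1', '1', '0'] c = false := hfalse 1 (by omega)
    have h2 : pvFA ['1', '1', '0', '1', '1', '0', '0'] c = false := hfalse 2 (by omega)
    have h3 : pvFA ['1', '0', '0', '0', '0', '1', '0'] c = false := hfalse 3 (by omega)
    have h4 : pvFA ['1', '0', '1', '1', '1', '0', '0'] c = false := hfalse 4 (by omega)
    have h5 : pvFA ['1', '0', '0', '1', '1', '1', '0'] c = false := hfalse 5 (by omega)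
    have h6 : pvFA ['0', '1', '0', '1', '1', '1', '1'] c = false := hfalse 6 (by omega)
    have h7 : pvFA ['0', '1', '1', '1', '0', '1', '1'] c = false := hfalse 7 (by omega)
    have ht' : pvFA ['0', '1', '1', '0', '1', '1', '1'] c = true := htrue
    simp [pvItemsA, List.filter_cons, h0, h1, h2, h3, h4, h5, h6, h7, ht']
    decide
  ·
    have h0 : pvFA ['1', '1', '1', '0', '0', '1', '0'] c = false := hfalse 0 (by omega)
    have h1 : pvFA ['1', '1', '0', '0', '1', '1', '0'] c = false := hfalse 1 (by omega)
    have h2 : pvFA ['1', '1', '0', '1', '1', '0', '0'] c = false := hfalse 2 (by omega)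
    have h3 : pvFA ['1', '0', '0', '0', '0', '1', '0'] c = false := hfalse 3 (by omega)
    have h4 : pvFA ['1', '0', '1', '1', '1', '0', '0'] c = false := hfalse 4 (by omega)
    have h5 : pvFA ['1', '0', '0', '1', '1', '1', '0'] c = false := hfalse 5 (by omega)
    have h6 : pvFA ['0', '1', '0', '1', '1', '1', '1'] c = false := hfalse 6 (by omega)
    have h7 : pvFA ['0', '1', '1', '1', '0', '1', '1'] c = false := hfalse 7 (by omega)
    have h8 : pvFA ['0', '1', '1', '0', '1', '1', '1'] c = false := hfalse 8 (by omega)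
    have ht' : pvFA ['0', '0', '0', '1', '0', '1', '1'] c = true := htrue
    simp [pvItemsA, h0, h1, h2, h3, h4, h5, h6, h7, h8, ht']
    decide

theorem chunk_eq (c : List Char) (hc : c.length ≤ 7)
    (hm : ∃ v ∈ pvPatsB, pvFA v c = true) :
    (PySem.List.pyGet? ((pvItemsA.filter
        (fun kv : String × List Char => pvFA kv.2 c)).map
        (fun kv : String × List Char => kv.1)) 0).getD "" = pvChunkB c := by
  obtain ⟨v, hv, hfa⟩ := hm
  obtain ⟨n, hn, rfl⟩ := List.mem_iff_getElem.1 hv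
  have hex : ∃ k, k < 10 ∧ pvFA (pvPatsB.getD k []) c = true := by
    refine ⟨n, by rw [pats_len] at hn; omega, ?_⟩
    rwa [List.getD_eq_getElem _ _ hn]
  have htp := Nat.find_spec hex
  have hfalse : ∀ j, j < Nat.find hex → pvFA (pvPatsB.getD j []) c = false := by
    intro j hj
    have hmin := Nat.find_min hex hj
    by_contra hb
    exact hmin ⟨by omega, by simpa using hb⟩
  rw [A_branch c (Nat.find hex) htp.1 htp.2 hfalse,
      B_branch c hc (Nat.find hex) htp.1 htp.2 hfalse]

theorem barcode_scanner_spec : Claim_equal_barcode_scanner := by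
  intro s _ hpre
  simp only [Pre_barcode_scanner] at hpre
  unfold Spec_barcode_scanner
  simp only [barcode_scanner, barcode_scanner_alt]
  refine PySem.List.foldl_congr_mem _ _ _ _ ?_
  intro acc i hi
  congr 1
  have h0i : 0 ≤ i := ((PySem.List.mem_pyRange_iff_of_pos (by norm_num) i).1 hi).1
  apply chunk_eq
  · rw [PySem.List.slice_toNat _ h0i (by omega)]
    calc (List.take ((i + 7).toNat - i.toNat) (List.drop i.toNat _)).length
        ≤ (i + 7).toNat - i.toNat := List.length_take_le _ _
      _ ≤ 7 := by omega
  · exact hpre i hi
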